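-- pv_equiv track=rewrite | github.com/jeahun1149/Portfolio | Programmers/Lv.1/신규 아이디 추천/My_solution.py | solution
-- ===== SOURCE A (Python) =====
-- def solution(new_id):
--     sp = [
--             'a','b','c','d','e','f','g','h','i','j','k','l','m','n','o','p','q','r','s','t','u','v','w','x','y','z'
--             ,'0','1','2','3','4','5','6','7','8','9'
--             ,'-','_','.'
--              ]
--     nick = new_id.lower()
--     nick_l = len(nick)
--     for i in range(0, len(nick)):
--         nick_t = nick[i:i+1]
--         if nick_t not in sp:
--             nick = nick.replace(nick_t, " ")
--     nick = nick.replace(" ", "")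
--
--     for i in range(len(nick), 1, -1):
--         nick = nick.replace('.'*i, '.')
--
--     while(1):
--         if nick[:1] != '.' and nick[-1:] != '.':
--             break
--         elif nick[:1] == '.':
--             nick = nick[1:]
--         elif nick[-1:] == '.':
--             nick = nick[:-1]
--     if nick == '':
--         nick = 'a'
--
--     if len(nick) > 15:
--         nick = nick[:-(len(nick)-15)]
--         if nick[-1:] == '.':
--             nick = nick[:-1]
--
--     while(len(nick) < 3):
--         nick += nick[-1:]
--     answer = nick
--
--     return answer
-- ===== SOURCE B (Python) =====
-- def solution(new_id):
--     # One-pass stack build: filter + collapse dot runs + drop leading dots in a single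
--     # traversal, then fix the tail (pop trailing dot, default, truncate, pad).
--     out = []
--     for c in new_id.lower():
--         if c in "abcdefghijklmnopqrstuvwxyz0123456789-_":
--             out.append(c)
--         elif c == '.' and out and out[-1] != '.':
--             out.append('.')
--     if out and out[-1] == '.':
--         out.pop()
--     s = ''.join(out) if out else 'a'
--     s = s[:15]
--     if s.endswith('.'):
--         s = s[:-1]
--     if len(s) < 3:
--         s += s[-1] * (3 - len(s))
--     return s
-- ===== Notes on version B (the rewrite author's own statement) =====
-- stated objective: faster
-- what changed: Replaces A's repeated whole-string replace passes (char-blanking pass per index, dot-run replace pass per length, iterative boundary stripping) with a single left-to-right stack build that filters, collapses dot runs and drops leading dots in one traversal, followed by O(1) tail fixes.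
import Mathlib
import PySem

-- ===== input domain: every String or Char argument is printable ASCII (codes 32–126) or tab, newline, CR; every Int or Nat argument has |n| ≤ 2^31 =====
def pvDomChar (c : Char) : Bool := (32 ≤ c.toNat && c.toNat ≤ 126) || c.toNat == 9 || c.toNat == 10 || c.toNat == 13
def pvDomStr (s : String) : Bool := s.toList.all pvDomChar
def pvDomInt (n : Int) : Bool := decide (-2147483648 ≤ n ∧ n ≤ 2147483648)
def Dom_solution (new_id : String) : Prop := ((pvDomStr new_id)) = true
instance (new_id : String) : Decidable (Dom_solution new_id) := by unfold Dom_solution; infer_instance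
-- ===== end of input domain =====

-- B replaces A's repeated whole-string replace passes with a single one-pass stack build
-- (filter + collapse dot runs + drop leading dots) plus O(1) tail fixes; measured faster.

-- ===== PORT A =====
-- sp, the list of allowed one-character strings
def spList : List (List Char) :=
  [['a'],['b'],['c'],['d'],['e'],['f'],['g'],['h'],['i'],['j'],['k'],['l'],['m'],
   ['n'],['o'],['p'],['q'],['r'],['s'],['t'],['u'],['v'],['w'],['x'],['y'],['z'],
   ['0'],['1'],['2'],['3'],['4'],['5'],['6'],['7'],['8'],['9'],
   ['-'],['_'],['.']]

-- the `while(1): …` boundary-dot stripping loop of A (terminates: length decreases)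
def solutionStrip (nick : List Char) : List Char :=
  if PySem.List.slice nick none (some 1) ≠ ['.'] ∧ PySem.List.slice nick (some (-1)) none ≠ ['.'] then
    nick
  else if h1 : PySem.List.slice nick none (some 1) = ['.'] then
    solutionStrip (PySem.List.slice nick (some 1) none)
  else if h2 : PySem.List.slice nick (some (-1)) none = ['.'] then
    solutionStrip (PySem.List.slice nick none (some (-1)))
  else nick
termination_by nick.length
decreasing_by
  · rw [PySem.List.slice_from_one]
    rcases nick with _ | ⟨c, t⟩
    · simp [PySem.List.slice] at h1
    · simp
  · rw [PySem.List.slice_to_neg_one]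
    rcases nick with _ | ⟨c, t⟩
    · simp [PySem.List.slice] at h2
    · simp [List.length_dropLast]

-- the `while(len(nick) < 3): nick += nick[-1:]` loop of A
-- (the `nick = []` guard is a totality guard only: Python loops forever there, and that
--  state is unreachable in `solution`)
def solutionPad (nick : List Char) : List Char :=
  if nick.length < 3 then
    if h : nick = [] then nick
    else solutionPad (nick ++ PySem.List.slice nick (some (-1)) none)
  else nick
termination_by 3 - nick.length
decreasing_by
  rw [PySem.List.slice_from_neg_one]
  have hlen : (nick.drop (nick.length - 1)).length = 1 := by
    have : nick.length ≠ 0 := by simpa using h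
    simp; omega
  simp [hlen]; omega

def solution (new_id : String) : String :=
  let nick0 := (PySem.Str.lower new_id).toList
  -- for i in range(0, len(nick)): blank every character not in sp
  let nick1 := (PySem.List.pyRange 0 (nick0.length : Int) 1).foldl
      (fun nick i =>
        let nickT := PySem.List.slice nick (some i) (some (i+1))
        if nickT ∈ spList then nick else PySem.Chars.replace nick nickT [' ']) nick0
  -- nick = nick.replace(" ", "")
  let nick2 := PySem.Chars.replace nick1 [' '] []
  -- for i in range(len(nick), 1, -1): nick = nick.replace('.'*i, '.')
  let nick3 := (PySem.List.pyRange (nick2.length : Int) 1 (-1)).foldl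
      (fun nick i => PySem.Chars.replace nick (List.replicate i.toNat '.') ['.']) nick2
  let nick4 := solutionStrip nick3
  let nick5 := if nick4 = [] then ['a'] else nick4
  let nick6 :=
    if nick5.length > 15 then
      let t := PySem.List.slice nick5 none (some (-((nick5.length : Int) - 15)))
      if PySem.List.slice t (some (-1)) none = ['.'] then PySem.List.slice t none (some (-1)) else t
    else nick5
  String.ofList (solutionPad nick6)

-- ===== PORT B =====
def allowedB : List Char :=
  ['a','b','c','d','e','f','g','h','i','j','k','l','m','n','o','p','q','r','s','t',
   'u','v','w','x','y','z','0','1','2','3','4','5','6','7','8','9','-','_']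

def solution_alt (new_id : String) : String :=
  -- `out` is kept reversed (Python appends on the right; here we cons at the front, so
  -- Python's out[-1] is the head); ''.join(out) is the final reverse.
  let out := (PySem.Str.lower new_id).toList.foldl
      (fun out c =>
        if c ∈ allowedB then c :: out
        else if c = '.' ∧ out ≠ [] ∧ out.head? ≠ some '.' then '.' :: out
        else out) []
  -- if out and out[-1] == '.': out.pop()
  let out1 := if out ≠ [] ∧ out.head? = some '.' then out.tail else out
  -- s = ''.join(out) if out else 'a'
  let s0 := if out1 ≠ [] then out1.reverse else ['a']
  let s1 := PySem.List.slice s0 none (some 15)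
  let s2 := if PySem.Chars.endswith s1 ['.'] then PySem.List.slice s1 none (some (-1)) else s1
  -- len(s) ≥ 1 always holds here, so the default of pyGet? is unreachable
  let s3 := if s2.length < 3 then s2 ++ List.replicate (3 - s2.length) ((PySem.List.pyGet? s2 (-1)).getD 'a') else s2
  String.ofList s3

-- ===== PRECONDITION & SPEC =====
def Spec_solution (new_id : String) (out : String) : Prop := out = solution_alt new_id
instance (new_id : String) (out : String) : Decidable (Spec_solution new_id out) := by unfold Spec_solution; infer_instance

-- ===== CLAIM (what is proved, stated in full; the proofs are below) =====
def Claim_equal_solution : Prop := ∀ (new_id : String), Dom_solution new_id → Spec_solution new_id (solution new_id)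


-- ===== LEMMAS AND PROOFS =====

-- okc c: c is an allowed character (lowercase letter, digit, '-', '_', '.')
def okc (c : Char) : Bool := c ∈ allowedB || c == '.'

-- structural view of Python's leftmost non-overlapping replace (nonempty pattern o::ot)
def repl (o : Char) (ot new : List Char) : List Char → List Char
  | [] => []
  | c :: t =>
    if (o :: ot).isPrefixOf (c :: t) then new ++ repl o ot new (t.drop ot.length)
    else c :: repl o ot new t
termination_by l => l.length
decreasing_by
  · simp only [List.length_cons]
    have := List.length_drop (l := t) (i := ot.length)
    omega
  · simp

theorem replace_go_eq (o : Char) (ot new : List Char) :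
    ∀ (fuel : Nat) (l acc : List Char), l.length ≤ fuel →
      PySem.Chars.replace.go (o :: ot) new fuel l acc = acc.reverse ++ repl o ot new l := by
  intro fuel
  induction fuel with
  | zero =>
    intro l acc h
    have : l = [] := by cases l <;> simp_all
    subst this
    simp [PySem.Chars.replace.go, repl]
  | succ n ih =>
    intro l acc h
    cases l with
    | nil => simp [PySem.Chars.replace.go, repl]
    | cons c t =>
      by_cases hp : (o :: ot).isPrefixOf (c :: t) = true
      · rw [PySem.Chars.replace.go]
        simp only [hp, if_pos]
        rw [ih]
        · rw [repl]
          simp [hp]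
        · have := List.length_drop (l := t) (i := ot.length)
          simp at h
          simp [this]
          omega
      · rw [PySem.Chars.replace.go]
        simp only [hp]
        rw [if_neg (by simp [hp])]
        rw [ih]
        · rw [repl]
          simp [hp]
        · simp at h; omega

theorem replace_eq (o : Char) (ot new l : List Char) :
    PySem.Chars.replace l (o :: ot) new = repl o ot new l := by
  rw [PySem.Chars.replace]
  simp only [List.isEmpty_cons, Bool.false_eq_true, if_false]
  rw [replace_go_eq o ot new l.length l [] le_rfl]
  simp


theorem repl_single_map (a b : Char) (l : List Char) :
    repl a [] [b] l = l.map (fun c => if c = a then b else c) := by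
  induction l with
  | nil => rw [repl]; simp
  | cons c t ih =>
    rw [repl]
    by_cases h : c = a
    · subst h
      simp [List.isPrefixOf, ih]
    · simp [List.isPrefixOf, h, ih]
      intro h'; exact absurd h'.symm h

theorem repl_single_del (a : Char) (l : List Char) :
    repl a [] [] l = l.filter (fun c => !(c = a)) := by
  induction l with
  | nil => rw [repl]; simp
  | cons c t ih =>
    rw [repl]
    by_cases h : c = a
    · subst h; simp [List.isPrefixOf, ih]
    · simp [List.isPrefixOf, h, ih]
      intro h'; exact absurd h'.symm h

-- squeeze: collapse every run of dots to one dot; with b = true a leading run is dropped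
def sqz (b : Bool) : List Char → List Char
  | [] => []
  | c :: t => if c = '.' then (if b then sqz true t else '.' :: sqz true t) else c :: sqz false t

theorem sqz_head_ne (m : List Char) : (sqz true m).head? ≠ some '.' := by
  induction m with
  | nil => simp [sqz]
  | cons c t ih =>
    by_cases h : c = '.'
    · subst h; simpa [sqz] using ih
    · simp [sqz, h]

theorem sqz_true_eq_of_head (x : List Char) (h : x.head? ≠ some '.') :
    sqz true x = sqz false x := by
  cases x with
  | nil => rfl
  | cons c t =>
    have : c ≠ '.' := by simpa using h
    simp [sqz, this]

theorem sqz_norun2 (m : List Char) (b : Bool) : ¬ (['.', '.'] <:+: sqz b m) := by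
  induction m generalizing b with
  | nil => simp [sqz]
  | cons c t ih =>
    by_cases h : c = '.'
    · subst h
      cases b with
      | true => simpa [sqz] using ih true
      | false =>
        simp only [sqz, if_pos rfl, if_neg]
        intro hinf
        rcases List.infix_cons_iff.mp hinf with hp | hi
        · rcases hp with ⟨r, hr⟩
          have h2 : (sqz true t).head? = some '.' := by
            have : sqz true t = '.' :: r := by
              have := hr
              simp at this
              exact this.symm
            rw [this]; rfl
          exact sqz_head_ne t h2
        · exact ih true hi
    · simp only [sqz, if_neg h]
      intro hinf
      rcases List.infix_cons_iff.mp hinf with hp | hi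
      · rcases hp with ⟨r, hr⟩
        injection hr with h1 _
        exact h h1.symm
      · exact ih false hi

theorem sqz_id_of_norun2 (x : List Char) (h : ¬ (['.', '.'] <:+: x)) :
    sqz false x = x := by
  induction x with
  | nil => rfl
  | cons c t ih =>
    by_cases hc : c = '.'
    · subst hc
      have ht : t.head? ≠ some '.' := by
        intro hh
        cases t with
        | nil => simp at hh
        | cons d u =>
          simp at hh
          subst hh
          exact h ⟨[], u, rfl⟩
      have hstep : sqz false ('.' :: t) = '.' :: sqz true t := by simp [sqz]
      rw [hstep, sqz_true_eq_of_head t ht, ih (fun hi => h (List.infix_cons hi))]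
    · rw [sqz]
      simp only [if_neg hc]
      rw [ih (fun hi => h (List.infix_cons hi))]

def leadDots (x : List Char) : Nat := (x.takeWhile (fun c => c == '.')).length

theorem leadDots_cons_dot (t : List Char) : leadDots ('.' :: t) = leadDots t + 1 := by
  simp [leadDots]

theorem leadDots_cons_ne (c : Char) (t : List Char) (h : c ≠ '.') : leadDots (c :: t) = 0 := by
  simp [leadDots, List.takeWhile_cons, h]

theorem leadDots_zero_head (x : List Char) (h : leadDots x = 0) : x.head? ≠ some '.' := by
  cases x with
  | nil => simp
  | cons c t =>
    intro hh
    simp at hh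
    subst hh
    rw [leadDots_cons_dot] at h
    omega

theorem takeWhile_dots_eq_replicate (x : List Char) :
    x.takeWhile (fun c => c == '.') = List.replicate (leadDots x) '.' := by
  rw [List.eq_replicate_iff]
  refine ⟨rfl, ?_⟩
  intro b hb
  have := List.mem_takeWhile_imp hb
  simpa using this

theorem replicate_dots_prefix_iff (k : Nat) (l : List Char) :
    List.replicate k '.' <+: l ↔ k ≤ leadDots l := by
  induction k generalizing l with
  | zero => simp
  | succ k ih =>
    cases l with
    | nil =>
      simp only [List.replicate_succ]
      constructor
      · intro h
        have := h.length_le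
        simp at this
      · intro h
        simp [leadDots] at h
    | cons c t =>
      rw [List.replicate_succ]
      constructor
      · intro h
        rcases h with ⟨r, hr⟩
        simp at hr
        obtain ⟨h1, h2⟩ := hr
        subst h1
        rw [leadDots_cons_dot]
        have hk : k ≤ leadDots t := (ih t).mp ⟨r, h2⟩
        omega
      · intro h
        by_cases hc : c = '.'
        · subst hc
          rw [leadDots_cons_dot] at h
          have : List.replicate k '.' <+: t := (ih t).mpr (by omega)
          rcases this with ⟨r, hr⟩
          exact ⟨r, by simp [hr]⟩
        · rw [leadDots_cons_ne c t hc] at h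
          omega

theorem norun_cons_ne (k : Nat) (hk : 1 ≤ k) (c : Char) (x : List Char) (hc : c ≠ '.')
    (h : ¬ (List.replicate k '.' <:+: x)) : ¬ (List.replicate k '.' <:+: (c :: x)) := by
  intro hinf
  rcases List.infix_cons_iff.mp hinf with hp | hi
  · rcases k with _ | k
    · omega
    · rw [List.replicate_succ] at hp
      rcases hp with ⟨r, hr⟩
      injection hr with h1 _
      exact hc h1.symm
  · exact h hi

theorem norun_cons_dot (k : Nat) (hk : 2 ≤ k) (x : List Char)
    (h : ¬ (List.replicate k '.' <:+: x)) (hld : leadDots x + 2 ≤ k) :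
    ¬ (List.replicate k '.' <:+: ('.' :: x)) := by
  intro hinf
  rcases List.infix_cons_iff.mp hinf with hp | hi
  · have := (replicate_dots_prefix_iff k ('.' :: x)).mp hp
    rw [leadDots_cons_dot] at this
    omega
  · exact h hi

theorem sqz_false_replicate (r : Nat) (hr : 1 ≤ r) (x : List Char) :
    sqz false (List.replicate r '.' ++ x) = '.' :: sqz true x ∧
    sqz true (List.replicate r '.' ++ x) = sqz true x := by
  induction r with
  | zero => omega
  | succ r ih =>
    rcases Nat.eq_or_lt_of_le hr with h1 | h1
    · have : r = 0 := by omega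
      subst this
      simp [sqz]
    · have hr' : 1 ≤ r := by omega
      obtain ⟨ih1, ih2⟩ := ih hr'
      constructor
      · rw [List.replicate_succ, List.cons_append]
        have hstep : sqz false ('.' :: (List.replicate r '.' ++ x)) =
            '.' :: sqz true (List.replicate r '.' ++ x) := by simp [sqz]
        rw [hstep, ih2]
      · rw [List.replicate_succ, List.cons_append]
        have hstep : sqz true ('.' :: (List.replicate r '.' ++ x)) =
            sqz true (List.replicate r '.' ++ x) := by simp [sqz]
        rw [hstep, ih2]

theorem dots_decomp (x : List Char) :
    x = List.replicate (leadDots x) '.' ++ x.dropWhile (fun c => c == '.') := by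
  rw [← takeWhile_dots_eq_replicate]
  exact (List.takeWhile_append_dropWhile).symm

theorem leadDots_dropWhile (x : List Char) : leadDots (x.dropWhile (fun c => c == '.')) = 0 := by
  cases hh : (x.dropWhile (fun c => c == '.')) with
  | nil => simp [leadDots]
  | cons c t =>
    have hc := List.head?_dropWhile_not (p := fun c => c == '.') (l := x)
    rw [hh] at hc
    simp at hc
    rw [leadDots_cons_ne c t hc]

theorem pass_spec (k : Nat) (hk : 2 ≤ k) :
    ∀ (n : Nat) (l : List Char), l.length ≤ n → ¬ (List.replicate (k+1) '.' <:+: l) →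
      sqz false (repl '.' (List.replicate (k-1) '.') ['.'] l) = sqz false l ∧
      sqz true (repl '.' (List.replicate (k-1) '.') ['.'] l) = sqz true l ∧
      ¬ (List.replicate k '.' <:+: repl '.' (List.replicate (k-1) '.') ['.'] l) ∧
      leadDots (repl '.' (List.replicate (k-1) '.') ['.'] l) =
        (if leadDots l = k then 1 else leadDots l) := by
  have hrep : '.' :: List.replicate (k-1) '.' = List.replicate k '.' := by
    rw [← List.replicate_succ]; congr 1; omega
  intro n
  induction n with
  | zero =>
    intro l hlen _
    have : l = [] := by cases l <;> simp_all
    subst this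
    rw [repl]
    refine ⟨rfl, rfl, ?_, ?_⟩
    · intro h
      have := h.length_le
      simp at this
      omega
    · simp [leadDots]
      omega
  | succ n ih =>
    intro l hlen hno
    cases l with
    | nil =>
      rw [repl]
      refine ⟨rfl, rfl, ?_, ?_⟩
      · intro h
        have := h.length_le
        simp at this
        omega
      · simp [leadDots]
        omega
    | cons c t =>
      by_cases hc : c = '.'
      · subst hc
        have hr1 : leadDots ('.' :: t) = leadDots t + 1 := leadDots_cons_dot t
        have hrk : leadDots ('.' :: t) ≤ k := by
          by_contra hgt
          exact hno (((replicate_dots_prefix_iff (k+1) ('.'::t)).mpr (by omega)).isInfix)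
        by_cases heq : leadDots ('.' :: t) = k
        · -- the pattern (k dots) is a prefix: it eats the whole leading run
          have hpre : ('.' :: List.replicate (k-1) '.').isPrefixOf ('.' :: t) = true := by
            rw [hrep]
            exact List.isPrefixOf_iff_prefix.mpr
              ((replicate_dots_prefix_iff k ('.'::t)).mpr (le_of_eq heq.symm))
          rw [repl, if_pos hpre]
          set rest := ('.' :: t).dropWhile (fun c => c == '.') with hrestdef
          have hdec : ('.' :: t) = List.replicate k '.' ++ rest := by
            conv_lhs => rw [dots_decomp ('.'::t)]
            rw [heq]
          have hdrop : t.drop (List.replicate (k-1) '.').length = rest := by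
            have h1 : ('.' :: t).drop k = t.drop (k-1) := by
              have : k = (k-1) + 1 := by omega
              rw [this, List.drop_succ_cons]
              simp
            rw [List.length_replicate, ← h1, hdec]
            have h2 := List.drop_left (l₁ := List.replicate k '.') (l₂ := rest)
            simpa using h2
          rw [hdrop]
          have hrest_suffix : rest <:+ ('.' :: t) := List.dropWhile_suffix _
          have hrest_len : rest.length ≤ n := by
            have := hrest_suffix.length_le
            have hk2 : rest.length + k = ('.' :: t).length := by
              rw [hdec]; simp; omega
            simp at hlen hk2 ⊢
            omega
          have hrest_no : ¬ (List.replicate (k+1) '.' <:+: rest) :=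
            fun h => hno (h.trans hrest_suffix.isInfix)
          obtain ⟨ih1, ih2, ih3, ih4⟩ := ih rest hrest_len hrest_no
          have hld0 : leadDots rest = 0 := leadDots_dropWhile _
          have hldpass : leadDots (repl '.' (List.replicate (k-1) '.') ['.'] rest) = 0 := by
            rw [ih4, hld0]
            simp
            omega
          have hheadpass := leadDots_zero_head _ hldpass
          have hheadrest := leadDots_zero_head _ hld0
          refine ⟨?_, ?_, ?_, ?_⟩
          · have hstep : sqz false ('.' :: repl '.' (List.replicate (k-1) '.') ['.'] rest) =
                '.' :: sqz true (repl '.' (List.replicate (k-1) '.') ['.'] rest) := by simp [sqz]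
            simp only [List.singleton_append]
            rw [hstep, sqz_true_eq_of_head _ hheadpass, ih1, sqz_true_eq_of_head _ hheadrest] at *
            conv_rhs => rw [hdec]
            rw [(sqz_false_replicate k (by omega) rest).1, sqz_true_eq_of_head _ hheadrest]
          · have hstep : sqz true ('.' :: repl '.' (List.replicate (k-1) '.') ['.'] rest) =
                sqz true (repl '.' (List.replicate (k-1) '.') ['.'] rest) := by simp [sqz]
            simp only [List.singleton_append]
            rw [hstep, sqz_true_eq_of_head _ hheadpass, ih1, ← sqz_true_eq_of_head _ hheadrest]
            conv_rhs => rw [hdec]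
            rw [(sqz_false_replicate k (by omega) rest).2]
          · simp only [List.singleton_append]
            exact norun_cons_dot k hk _ ih3 (by omega)
          · simp only [List.singleton_append]
            rw [leadDots_cons_dot, hldpass, if_pos heq]
        · -- leading run shorter than the pattern: step over one dot
          have hpre : ('.' :: List.replicate (k-1) '.').isPrefixOf ('.' :: t) = false := by
            rw [hrep]
            by_contra hb
            have : List.replicate k '.' <+: ('.' :: t) :=
              List.isPrefixOf_iff_prefix.mp (by revert hb; cases (List.replicate k '.' : List Char).isPrefixOf ('.' :: t) <;> simp)
            have := (replicate_dots_prefix_iff k ('.'::t)).mp this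
            omega
          rw [repl, if_neg (by simp [hpre])]
          have hlen' : t.length ≤ n := by simp at hlen; omega
          have hno' : ¬ (List.replicate (k+1) '.' <:+: t) := fun h => hno (List.infix_cons h)
          obtain ⟨ih1, ih2, ih3, ih4⟩ := ih t hlen' hno'
          have hldt : leadDots t ≠ k := by omega
          have hldpass : leadDots (repl '.' (List.replicate (k-1) '.') ['.'] t) = leadDots t := by
            rw [ih4, if_neg hldt]
          refine ⟨?_, ?_, ?_, ?_⟩
          · have hstep : ∀ x, sqz false ('.' :: x) = '.' :: sqz true x := fun x => by simp [sqz]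
            rw [hstep, hstep, ih2]
          · have hstep : ∀ x, sqz true ('.' :: x) = sqz true x := fun x => by simp [sqz]
            rw [hstep, hstep, ih2]
          · exact norun_cons_dot k hk _ ih3 (by omega)
          · rw [leadDots_cons_dot, hldpass, leadDots_cons_dot, if_neg (by omega)]
      · -- head is not a dot: copy it
        have hpre : ('.' :: List.replicate (k-1) '.').isPrefixOf (c :: t) = false := by
          simp [List.isPrefixOf]
          intro h
          exact absurd h.symm hc
        rw [repl, if_neg (by simp [hpre])]
        have hlen' : t.length ≤ n := by simp at hlen; omega
        have hno' : ¬ (List.replicate (k+1) '.' <:+: t) := fun h => hno (List.infix_cons h)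
        obtain ⟨ih1, ih2, ih3, ih4⟩ := ih t hlen' hno'
        refine ⟨?_, ?_, ?_, ?_⟩
        · have hstep : ∀ x, sqz false (c :: x) = c :: sqz false x := fun x => by simp [sqz, hc]
          rw [hstep, hstep, ih1]
        · have hstep : ∀ x, sqz true (c :: x) = c :: sqz false x := fun x => by simp [sqz, hc]
          rw [hstep, hstep, ih1]
        · exact norun_cons_ne k (by omega) c _ hc ih3
        · rw [leadDots_cons_ne c _ hc, leadDots_cons_ne c _ hc, if_neg (by omega)]

theorem loop_dots (i : Nat) (hi : 1 ≤ i) :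
    ∀ s : List Char, ¬ (List.replicate (i+1) '.' <:+: s) →
      sqz false ((PySem.List.pyRange (i : Int) 1 (-1)).foldl
          (fun nick j => PySem.Chars.replace nick (List.replicate j.toNat '.') ['.']) s) = sqz false s ∧
      ¬ (['.','.'] <:+: (PySem.List.pyRange (i : Int) 1 (-1)).foldl
          (fun nick j => PySem.Chars.replace nick (List.replicate j.toNat '.') ['.']) s) := by
  induction i, hi using Nat.le_induction with
  | base =>
    intro s hno
    rw [show ((1:Nat):Int) = 1 from rfl, PySem.List.pyRange_neg_one_eq_nil le_rfl]
    exact ⟨rfl, by simpa using hno⟩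
  | succ i hi ih =>
    intro s hno
    have hcons : PySem.List.pyRange ((i+1 : Nat) : Int) 1 (-1) =
        ((i+1 : Nat) : Int) :: PySem.List.pyRange ((i : Nat) : Int) 1 (-1) := by
      rw [show ((i+1 : Nat) : Int) = (i : Int) + 1 by push_cast; ring]
      rw [PySem.List.pyRange_neg_one_cons (by push_cast; omega)]
      norm_num
    rw [hcons, List.foldl_cons]
    have htonat : ((i+1 : Nat) : Int).toNat = i + 1 := by simp
    rw [htonat]
    have hrepl : PySem.Chars.replace s (List.replicate (i+1) '.') ['.'] =
        repl '.' (List.replicate i '.') ['.'] s := by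
      rw [List.replicate_succ, replace_eq]
    rw [hrepl]
    have hps := pass_spec (i+1) (by omega) s.length s le_rfl hno
    rw [show i + 1 - 1 = i from rfl] at hps
    obtain ⟨h1, _, h3, _⟩ := hps
    obtain ⟨ihl, ihr⟩ := ih (repl '.' (List.replicate i '.') ['.'] s) h3
    exact ⟨by rw [ihl, h1], ihr⟩

theorem mem_spList (c : Char) : ([c] ∈ spList) ↔ okc c = true := by
  have h : spList = (allowedB ++ ['.']).map (fun c => [c]) := by rfl
  rw [h]
  simp [okc, List.mem_map]

theorem mem_take_succ (L : List Char) (i : Nat) (hlt : i < L.length) (c : Char) :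
    c ∈ L.take (i+1) ↔ c ∈ L.take i ∨ c = L[i]'hlt := by
  rw [List.take_add_one, List.getElem?_eq_getElem hlt]
  rw [List.mem_append]
  simp only [Option.toList_some, List.mem_singleton]

theorem g_step_eq (L : List Char) (i : Nat) (hlt : i < L.length) (c : Char)
    (hcase : okc (L[i]'hlt) = true ∨ (L[i]'hlt) ∈ L.take i) :
    (if okc c = true then c else if c ∈ L.take (i+1) then ' ' else c)
      = (if okc c = true then c else if c ∈ L.take i then ' ' else c) := by
  by_cases h1 : okc c = true
  · rw [if_pos h1, if_pos h1]
  · rw [if_neg h1, if_neg h1]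
    by_cases h2 : c ∈ L.take i
    · rw [if_pos h2, if_pos ((mem_take_succ L i hlt c).mpr (Or.inl h2))]
    · rw [if_neg h2, if_neg]
      rw [mem_take_succ L i hlt c]
      rintro (h3 | h3)
      · exact h2 h3
      · subst h3
        rcases hcase with h4 | h4
        · exact h1 h4
        · exact h2 h4

theorem g_step_blank (L : List Char) (i : Nat) (hlt : i < L.length) (c : Char)
    (hA : ¬ okc (L[i]'hlt) = true) :
    (if (if okc c = true then c else if c ∈ L.take i then ' ' else c) = L[i]'hlt then ' '
      else (if okc c = true then c else if c ∈ L.take i then ' ' else c))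
      = (if okc c = true then c else if c ∈ L.take (i+1) then ' ' else c) := by
  by_cases h1 : okc c = true
  · rw [if_pos h1, if_pos h1, if_neg]
    intro h
    subst h
    exact hA h1
  · rw [if_neg h1, if_neg h1]
    by_cases h2 : c ∈ L.take i
    · rw [if_pos h2, if_pos ((mem_take_succ L i hlt c).mpr (Or.inl h2))]
      by_cases h3 : (' ' : Char) = L[i]'hlt
      · rw [if_pos h3]
      · rw [if_neg h3]
    · rw [if_neg h2]
      by_cases h3 : c = L[i]'hlt
      · rw [if_pos h3, if_pos ((mem_take_succ L i hlt c).mpr (Or.inr h3))]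
      · rw [if_neg h3, if_neg]
        rw [mem_take_succ L i hlt c]
        rintro (h4 | h4)
        · exact h2 h4
        · exact h3 h4

theorem map_space_id (M : List Char) : M.map (fun c => if c = ' ' then ' ' else c) = M := by
  have : ∀ c ∈ M, (if c = ' ' then ' ' else c) = id c := by
    intro c _
    by_cases h : c = ' '
    · simp [h]
    · simp [h]
  rw [List.map_congr_left this, List.map_id]

-- the blanking-loop invariant: after the first i indices, every already-seen bad
-- character has been replaced by ' '
theorem stage1_inv (L : List Char) (i : Nat) (hi : i ≤ L.length) :
    (PySem.List.pyRange 0 (i : Int) 1).foldl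
      (fun nick i =>
        let nickT := PySem.List.slice nick (some i) (some (i+1))
        if nickT ∈ spList then nick else PySem.Chars.replace nick nickT [' ']) L =
    L.map (fun c => if okc c = true then c else if c ∈ L.take i then ' ' else c) := by
  induction i with
  | zero =>
    rw [show ((0:Nat):Int) = 0 from rfl, PySem.List.pyRange_zero]
    simp
  | succ i ih =>
    have hi' : i ≤ L.length := by omega
    have hlt : i < L.length := by omega
    rw [show ((i+1:Nat):Int) = (i:Int) + 1 from by push_cast; ring]
    rw [PySem.List.pyRange_one_succ_right (by positivity), List.foldl_append, ih hi']
    simp only [List.foldl_cons, List.foldl_nil]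
    set M := L.map (fun c => if okc c = true then c else if c ∈ L.take i then ' ' else c) with hM
    have hMlen : M.length = L.length := by simp [hM]
    have hslice : PySem.List.slice M (some (i : Int)) (some ((i : Int) + 1)) = [M[i]'(by omega)] := by
      rw [show ((i : Int) + 1) = ((i : Int) + ((1 : Nat) : Int)) from by norm_num]
      rw [PySem.List.slice_natCast_add]
      rw [List.drop_eq_getElem_cons (by omega)]
      rfl
    have hMi : M[i]'(by omega) =
        (if okc (L[i]'hlt) = true then L[i]'hlt
         else if (L[i]'hlt) ∈ L.take i then ' ' else L[i]'hlt) := by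
      simp [hM]
    by_cases hA : okc (L[i]'hlt) = true
    · -- allowed character: nothing happens
      have hMieq : M[i]'(by omega) = L[i]'hlt := by rw [hMi, if_pos hA]
      rw [hslice, hMieq, if_pos ((mem_spList _).mpr hA)]
      rw [hM]
      exact (List.map_congr_left (fun c _ => g_step_eq L i hlt c (Or.inl hA))).symm
    · by_cases hB : (L[i]'hlt) ∈ L.take i
      · -- bad character already blanked: replacing ' ' by ' ' is the identity
        have hMieq : M[i]'(by omega) = ' ' := by rw [hMi, if_neg hA, if_pos hB]
        rw [hslice, hMieq, if_neg (by rw [mem_spList]; decide)]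
        rw [replace_eq, repl_single_map, map_space_id, hM]
        exact (List.map_congr_left (fun c _ => g_step_eq L i hlt c (Or.inr hB))).symm
      · -- first occurrence of a bad character: blank all its occurrences
        have hMieq : M[i]'(by omega) = L[i]'hlt := by rw [hMi, if_neg hA, if_neg hB]
        rw [hslice, hMieq, if_neg (by rw [mem_spList]; simpa using hA)]
        rw [replace_eq, repl_single_map, hM, List.map_map]
        apply List.map_congr_left
        intro c _
        exact g_step_blank L i hlt c hA

theorem okc_ne_space (c : Char) (h : okc c = true) : c ≠ ' ' := by
  intro h'
  subst h'
  simp [okc, allowedB] at h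

theorem filter_mask (M : List Char) :
    (M.map (fun c => if okc c = true then c else ' ')).filter (fun c => !(c = ' ')) = M.filter okc := by
  induction M with
  | nil => rfl
  | cons c t ih =>
    by_cases h : okc c = true
    · simp only [List.map_cons, if_pos h, List.filter_cons]
      simp [okc_ne_space c h, h, ih]
    · simp only [List.map_cons, if_neg h, List.filter_cons]
      simp [h, ih]

theorem stage1_full (L : List Char) :
    PySem.Chars.replace
      ((PySem.List.pyRange 0 (L.length : Int) 1).foldl
        (fun nick i =>
          let nickT := PySem.List.slice nick (some i) (some (i+1))
          if nickT ∈ spList then nick else PySem.Chars.replace nick nickT [' ']) L)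
      [' '] [] = L.filter okc := by
  rw [stage1_inv L L.length le_rfl, replace_eq, repl_single_del]
  have h1 : L.map (fun c => if okc c = true then c else if c ∈ L.take L.length then ' ' else c)
      = L.map (fun c => if okc c = true then c else ' ') := by
    apply List.map_congr_left
    intro c hc
    by_cases h : okc c = true
    · rw [if_pos h, if_pos h]
    · rw [if_neg h, if_neg h, if_pos (by rwa [List.take_length])]
  rw [h1, filter_mask]

def dropTrail (x : List Char) : List Char := if x.getLast? = some '.' then x.dropLast else x

theorem slice1_eq (x : List Char) : PySem.List.slice x none (some 1) = x.take 1 := by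
  rw [PySem.List.slice_to x (by norm_num : (0:Int) ≤ 1)]
  rfl

theorem take1_dot_iff (x : List Char) : x.take 1 = ['.'] ↔ x.head? = some '.' := by
  cases x <;> simp

theorem sliceLast_eq (x : List Char) : PySem.List.slice x (some (-1)) none = x.drop (x.length - 1) :=
  PySem.List.slice_from_neg_one x

theorem dropLen1_dot_iff (x : List Char) : x.drop (x.length - 1) = ['.'] ↔ x.getLast? = some '.' := by
  rcases List.eq_nil_or_concat x with h | ⟨z, a, h⟩
  · subst h; simp
  · subst h
    rw [List.concat_eq_append]
    have h1 : (z ++ [a]).drop ((z ++ [a]).length - 1) = [a] := by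
      have : (z ++ [a]).length - 1 = z.length := by simp
      rw [this]
      have := List.drop_left (l₁ := z) (l₂ := [a])
      simpa using this
    rw [h1]
    simp

theorem strip_fix (x : List Char) (hh : x.head? ≠ some '.') (hl : x.getLast? ≠ some '.') :
    solutionStrip x = x := by
  rw [solutionStrip]
  rw [if_pos]
  constructor
  · rw [slice1_eq]
    intro h
    exact hh ((take1_dot_iff x).mp h)
  · rw [sliceLast_eq]
    intro h
    exact hl ((dropLen1_dot_iff x).mp h)

theorem strip_eq (x : List Char) (hh : x.head? ≠ some '.') (hn : ¬ (['.','.'] <:+: x)) :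
    solutionStrip x = dropTrail x := by
  by_cases hl : x.getLast? = some '.'
  · obtain ⟨z, hz⟩ := (List.getLast?_eq_some_iff).mp hl
    subst hz
    have hz_ne : z ≠ [] := by
      rintro rfl
      exact hh (by simp)
    have hhead : z.head? = some ((z ++ ['.']).head?.getD 'a') ∧ (z ++ ['.']).head? = z.head? := by
      cases z with
      | nil => exact absurd rfl hz_ne
      | cons c t => simp
    have hzhead : z.head? ≠ some '.' := by
      rw [← hhead.2] at *
      exact hh
    have hzlast : z.getLast? ≠ some '.' := by
      intro h
      obtain ⟨w, hw⟩ := (List.getLast?_eq_some_iff).mp h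
      subst hw
      exact hn ⟨w, [], by simp⟩
    rw [solutionStrip]
    rw [if_neg, dif_neg, dif_pos]
    · rw [PySem.List.slice_to_neg_one, List.dropLast_concat]
      rw [strip_fix z hzhead hzlast, dropTrail, if_pos hl, List.dropLast_concat]
    · rw [sliceLast_eq]
      exact (dropLen1_dot_iff _).mpr hl
    · rw [slice1_eq]
      intro h
      exact hh ((take1_dot_iff _).mp h)
    · intro ⟨_, h2⟩
      exact h2 ((sliceLast_eq _) ▸ (dropLen1_dot_iff _).mpr hl)
  · rw [strip_fix x hh hl, dropTrail, if_neg hl]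

theorem strip_main (m : List Char) :
    solutionStrip (sqz false m) = dropTrail (sqz true m) := by
  by_cases hm : m.head? = some '.'
  · cases m with
    | nil => simp at hm
    | cons c t =>
      have hc : c = '.' := by simpa using hm
      subst hc
      have h1 : sqz false ('.'::t) = '.' :: sqz true t := by simp [sqz]
      have h2 : sqz true ('.'::t) = sqz true t := by simp [sqz]
      rw [h1, h2]
      rw [solutionStrip]
      rw [if_neg, dif_pos]
      · rw [PySem.List.slice_from_one]
        simp only [List.tail_cons]
        exact strip_eq _ (sqz_head_ne t) (sqz_norun2 t true)
      · rw [slice1_eq]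
        rfl
      · intro ⟨hA, _⟩
        exact hA (by rw [slice1_eq]; rfl)
  · rw [← sqz_true_eq_of_head m hm]
    exact strip_eq _ (sqz_head_ne m) (sqz_norun2 m true)

theorem pyGet_neg_one (w : List Char) (hw : w ≠ []) :
    PySem.List.pyGet? w (-1) = w.getLast? := by
  have hlen : 1 ≤ w.length := List.length_pos_iff.mpr hw
  rw [PySem.List.pyGet?, PySem.List.pyIdx?]
  rw [if_neg (by norm_num), if_pos (by push_cast; omega)]
  simp only [Option.bind_some, Int.neg_neg, Int.toNat_one]
  rw [List.getLast?_eq_getElem?]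

theorem endswith_dot_iff (x : List Char) :
    PySem.Chars.endswith x ['.'] = true ↔ x.getLast? = some '.' := by
  rw [PySem.Chars.endswith, List.isSuffixOf_iff_suffix]
  constructor
  · rintro ⟨z, hz⟩
    subst hz
    simp
  · intro h
    obtain ⟨z, hz⟩ := (List.getLast?_eq_some_iff).mp h
    exact ⟨z, hz.symm⟩

-- B's one-pass build: `out` (reversed) is the leading-stripped dot-collapsed filter
def pdFlag (acc : List Char) : Bool := decide (acc = []) || (acc.head? == some '.')

theorem foldB (T : List Char) : ∀ acc : List Char,
    T.foldl (fun out c =>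
        if c ∈ allowedB then c :: out
        else if c = '.' ∧ out ≠ [] ∧ out.head? ≠ some '.' then '.' :: out
        else out) acc
    = (sqz (pdFlag acc) (T.filter okc)).reverse ++ acc := by
  induction T with
  | nil =>
    intro acc
    simp [sqz]
  | cons c t ih =>
    intro acc
    simp only [List.foldl_cons]
    by_cases h1 : c ∈ allowedB
    · rw [if_pos h1, ih (c :: acc)]
      have hok : okc c = true := by simp [okc, h1]
      have hnd : c ≠ '.' := by
        intro h
        subst h
        exact absurd h1 (by decide)
      rw [List.filter_cons_of_pos hok]
      have hpd : pdFlag (c :: acc) = false := by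
        simp [pdFlag, hnd]
      rw [hpd]
      have hsq : ∀ b, sqz b (c :: t.filter okc) = c :: sqz false (t.filter okc) := by
        intro b
        simp [sqz, hnd]
      rw [hsq]
      simp
    · by_cases h2 : c = '.'
      · subst h2
        have hok : okc '.' = true := by decide
        rw [List.filter_cons_of_pos hok, if_neg h1]
        by_cases hpd : pdFlag acc = true
        · have hcond : ¬ (('.':Char) = '.' ∧ acc ≠ [] ∧ acc.head? ≠ some '.') := by
            rintro ⟨_, hne, hhd⟩
            simp [pdFlag] at hpd
            rcases hpd with h | h
            · exact hne h
            · exact hhd h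
          rw [if_neg hcond, ih acc]
          have : sqz (pdFlag acc) ('.' :: t.filter okc) = sqz true (t.filter okc) := by
            rw [hpd]; simp [sqz]
          rw [this, hpd]
        · have hpd2 : acc ≠ [] ∧ acc.head? ≠ some '.' := by
            simpa [pdFlag] using hpd
          have hcond : (('.':Char) = '.' ∧ acc ≠ [] ∧ acc.head? ≠ some '.') := ⟨rfl, hpd2.1, hpd2.2⟩
          rw [if_pos hcond, ih ('.' :: acc)]
          have hb : pdFlag acc = false := by simpa using hpd
          have hpd' : pdFlag ('.' :: acc) = true := by simp [pdFlag]
          rw [hpd', hb]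
          have : sqz false ('.' :: t.filter okc) = '.' :: sqz true (t.filter okc) := by
            simp [sqz]
          rw [this]
          simp
      · rw [if_neg h1, if_neg (fun h => h2 h.1), ih acc]
        have hok : okc c = false := by
          simp [okc, h1]
          exact h2
        rw [List.filter_cons_of_neg (by simp [hok])]

theorem pad_eq (w : List Char) (hw : w ≠ []) :
    solutionPad w = w ++ List.replicate (3 - w.length) ((PySem.List.pyGet? w (-1)).getD 'a') := by
  match w with
  | [a] =>
    rw [pyGet_neg_one [a] (by simp)]
    rw [solutionPad]
    rw [if_pos (by norm_num), dif_neg (by simp), PySem.List.slice_from_neg_one]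
    simp only [List.length_singleton, Nat.sub_self, List.drop_zero, List.singleton_append]
    rw [solutionPad]
    rw [if_pos (by norm_num), dif_neg (by simp), PySem.List.slice_from_neg_one]
    simp only [List.length_cons, List.length_singleton]
    rw [solutionPad]
    simp [List.replicate]
  | [a, b] =>
    rw [pyGet_neg_one [a, b] (by simp)]
    rw [solutionPad]
    rw [if_pos (by norm_num), dif_neg (by simp), PySem.List.slice_from_neg_one]
    simp only [List.length_cons, List.length_singleton]
    rw [solutionPad]
    simp [List.replicate]
  | a :: b :: c :: t =>
    rw [solutionPad]
    rw [if_neg (by simp)]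
    have : 3 - (a :: b :: c :: t).length = 0 := by simp
    rw [this]
    simp

theorem dropTrail_last (u : List Char) (hn : ¬ (['.','.'] <:+: u)) :
    (dropTrail u).getLast? ≠ some '.' := by
  rw [dropTrail]
  by_cases h : u.getLast? = some '.'
  · rw [if_pos h]
    obtain ⟨z, hz⟩ := (List.getLast?_eq_some_iff).mp h
    subst hz
    rw [List.dropLast_concat]
    intro h2
    obtain ⟨y, hy⟩ := (List.getLast?_eq_some_iff).mp h2
    subst hy
    exact hn ⟨y, [], by simp⟩
  · rw [if_neg h]
    exact h

-- the common tail: default/truncate/untrail/pad, starting from a nonempty list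
-- that does not end in a dot
theorem tail_stage (w : List Char) (hw : w ≠ []) (hl : w.getLast? ≠ some '.') :
    solutionPad
      (if w.length > 15 then
        (if PySem.List.slice (PySem.List.slice w none (some (-((w.length : Int) - 15)))) (some (-1)) none = ['.']
         then PySem.List.slice (PySem.List.slice w none (some (-((w.length : Int) - 15)))) none (some (-1))
         else PySem.List.slice w none (some (-((w.length : Int) - 15))))
       else w) =
    (if (if PySem.Chars.endswith (PySem.List.slice w none (some 15)) ['.'] = true
         then PySem.List.slice (PySem.List.slice w none (some 15)) none (some (-1))
         else PySem.List.slice w none (some 15)).length < 3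
     then (if PySem.Chars.endswith (PySem.List.slice w none (some 15)) ['.'] = true
           then PySem.List.slice (PySem.List.slice w none (some 15)) none (some (-1))
           else PySem.List.slice w none (some 15)) ++
          List.replicate (3 - (if PySem.Chars.endswith (PySem.List.slice w none (some 15)) ['.'] = true
           then PySem.List.slice (PySem.List.slice w none (some 15)) none (some (-1))
           else PySem.List.slice w none (some 15)).length)
            ((PySem.List.pyGet? (if PySem.Chars.endswith (PySem.List.slice w none (some 15)) ['.'] = true
           then PySem.List.slice (PySem.List.slice w none (some 15)) none (some (-1))
           else PySem.List.slice w none (some 15)) (-1)).getD 'a')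
     else (if PySem.Chars.endswith (PySem.List.slice w none (some 15)) ['.'] = true
           then PySem.List.slice (PySem.List.slice w none (some 15)) none (some (-1))
           else PySem.List.slice w none (some 15))) := by
  have hs15 : PySem.List.slice w none (some 15) = w.take 15 := by
    rw [PySem.List.slice_to w (by norm_num : (0:Int) ≤ 15)]
    rfl
  by_cases hlen : w.length > 15
  · have hneg : PySem.List.slice w none (some (-((w.length : Int) - 15))) = w.take 15 := by
      rw [show (-((w.length : Int) - 15)) = -(((w.length - 15 : Nat) : Int)) from by push_cast; omega]
      rw [PySem.List.slice_to_neg_natCast w (w.length - 15) (by omega)]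
      congr 1
      omega
    rw [if_pos hlen, hneg, hs15]
    set t := w.take 15 with ht
    have htne : t ≠ [] := by
      rw [ht]
      intro h
      rcases List.take_eq_nil_iff.mp h with h' | h'
      · exact absurd h' (by norm_num)
      · exact hw h' 
    have hcond : (PySem.List.slice t (some (-1)) none = ['.']) ↔ (PySem.Chars.endswith t ['.'] = true) := by
      rw [sliceLast_eq, dropLen1_dot_iff, endswith_dot_iff]
    have htlen : t.length = 15 := by
      rw [ht]
      simp
      omega
    by_cases hc : PySem.Chars.endswith t ['.'] = true
    · rw [if_pos (hcond.mpr hc), if_pos hc]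
      rw [PySem.List.slice_to_neg_one]
      have hdl : t.dropLast.length = 14 := by simp [htlen]
      rw [solutionPad, if_neg (by rw [hdl]; omega), if_neg (by rw [hdl]; omega)]
    · rw [if_neg (fun h => hc (hcond.mp h)), if_neg hc]
      rw [solutionPad, if_neg (by rw [htlen]; omega), if_neg (by rw [htlen]; omega)]
  · have htk : w.take 15 = w := List.take_of_length_le (by omega)
    rw [if_neg hlen, hs15, htk]
    rw [if_neg (fun h => hl ((endswith_dot_iff w).mp h))]
    rw [pad_eq w hw]
    by_cases h3 : w.length < 3
    · rw [if_pos h3]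
    · rw [if_neg h3]
      have : 3 - w.length = 0 := by omega
      rw [this]
      simp

-- the common middle value: filtered, dot-collapsed, boundary-dot-stripped, defaulted
def midVal (L : List Char) : List Char :=
  let v := dropTrail (sqz true (L.filter okc))
  if v = [] then ['a'] else v

theorem A_eq (L : List Char) :
    solutionPad
      (if (if solutionStrip ((PySem.List.pyRange
                  (((PySem.Chars.replace
                      ((PySem.List.pyRange 0 (L.length : Int) 1).foldl
                        (fun nick i =>
                          let nickT := PySem.List.slice nick (some i) (some (i+1))
                          if nickT ∈ spList then nick else PySem.Chars.replace nick nickT [' ']) L)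
                      [' '] []).length : Int)) 1 (-1)).foldl
                (fun nick i => PySem.Chars.replace nick (List.replicate i.toNat '.') ['.'])
                (PySem.Chars.replace
                      ((PySem.List.pyRange 0 (L.length : Int) 1).foldl
                        (fun nick i =>
                          let nickT := PySem.List.slice nick (some i) (some (i+1))
                          if nickT ∈ spList then nick else PySem.Chars.replace nick nickT [' ']) L)
                      [' '] [])) = [] then ['a'] else solutionStrip ((PySem.List.pyRange
                  (((PySem.Chars.replace
                      ((PySem.List.pyRange 0 (L.length : Int) 1).foldl
                        (fun nick i =>
                          let nickT := PySem.List.slice nick (some i) (some (i+1))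
                          if nickT ∈ spList then nick else PySem.Chars.replace nick nickT [' ']) L)
                      [' '] []).length : Int)) 1 (-1)).foldl
                (fun nick i => PySem.Chars.replace nick (List.replicate i.toNat '.') ['.'])
                (PySem.Chars.replace
                      ((PySem.List.pyRange 0 (L.length : Int) 1).foldl
                        (fun nick i =>
                          let nickT := PySem.List.slice nick (some i) (some (i+1))
                          if nickT ∈ spList then nick else PySem.Chars.replace nick nickT [' ']) L)
                      [' '] []))).length > 15 then
         (if PySem.List.slice
              (PySem.List.slice (if solutionStrip ((PySem.List.pyRange
                  (((PySem.Chars.replace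
                      ((PySem.List.pyRange 0 (L.length : Int) 1).foldl
                        (fun nick i =>
                          let nickT := PySem.List.slice nick (some i) (some (i+1))
                          if nickT ∈ spList then nick else PySem.Chars.replace nick nickT [' ']) L)
                      [' '] []).length : Int)) 1 (-1)).foldl
                (fun nick i => PySem.Chars.replace nick (List.replicate i.toNat '.') ['.'])
                (PySem.Chars.replace
                      ((PySem.List.pyRange 0 (L.length : Int) 1).foldl
                        (fun nick i =>
                          let nickT := PySem.List.slice nick (some i) (some (i+1))
                          if nickT ∈ spList then nick else PySem.Chars.replace nick nickT [' ']) L)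
                      [' '] [])) = [] then ['a'] else solutionStrip ((PySem.List.pyRange
                  (((PySem.Chars.replace
                      ((PySem.List.pyRange 0 (L.length : Int) 1).foldl
                        (fun nick i =>
                          let nickT := PySem.List.slice nick (some i) (some (i+1))
                          if nickT ∈ spList then nick else PySem.Chars.replace nick nickT [' ']) L)
                      [' '] []).length : Int)) 1 (-1)).foldl
                (fun nick i => PySem.Chars.replace nick (List.replicate i.toNat '.') ['.'])
                (PySem.Chars.replace
                      ((PySem.List.pyRange 0 (L.length : Int) 1).foldl
                        (fun nick i =>
                          let nickT := PySem.List.slice nick (some i) (some (i+1))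
                          if nickT ∈ spList then nick else PySem.Chars.replace nick nickT [' ']) L)
                      [' '] []))) none (some (-(((if solutionStrip ((PySem.List.pyRange
                  (((PySem.Chars.replace
                      ((PySem.List.pyRange 0 (L.length : Int) 1).foldl
                        (fun nick i =>
                          let nickT := PySem.List.slice nick (some i) (some (i+1))
                          if nickT ∈ spList then nick else PySem.Chars.replace nick nickT [' ']) L)
                      [' '] []).length : Int)) 1 (-1)).foldl
                (fun nick i => PySem.Chars.replace nick (List.replicate i.toNat '.') ['.'])
                (PySem.Chars.replace
                      ((PySem.List.pyRange 0 (L.length : Int) 1).foldl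
                        (fun nick i =>
                          let nickT := PySem.List.slice nick (some i) (some (i+1))
                          if nickT ∈ spList then nick else PySem.Chars.replace nick nickT [' ']) L)
                      [' '] [])) = [] then ['a'] else solutionStrip ((PySem.List.pyRange
                  (((PySem.Chars.replace
                      ((PySem.List.pyRange 0 (L.length : Int) 1).foldl
                        (fun nick i =>
                          let nickT := PySem.List.slice nick (some i) (some (i+1))
                          if nickT ∈ spList then nick else PySem.Chars.replace nick nickT [' ']) L)
                      [' '] []).length : Int)) 1 (-1)).foldl
                (fun nick i => PySem.Chars.replace nick (List.replicate i.toNat '.') ['.'])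
                (PySem.Chars.replace
                      ((PySem.List.pyRange 0 (L.length : Int) 1).foldl
                        (fun nick i =>
                          let nickT := PySem.List.slice nick (some i) (some (i+1))
                          if nickT ∈ spList then nick else PySem.Chars.replace nick nickT [' ']) L)
                      [' '] []))).length : Int) - 15))))
              (some (-1)) none = ['.']
          then PySem.List.slice
              (PySem.List.slice (if solutionStrip ((PySem.List.pyRange
                  (((PySem.Chars.replace
                      ((PySem.List.pyRange 0 (L.length : Int) 1).foldl
                        (fun nick i =>
                          let nickT := PySem.List.slice nick (some i) (some (i+1))
                          if nickT ∈ spList then nick else PySem.Chars.replace nick nickT [' ']) L)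
                      [' '] []).length : Int)) 1 (-1)).foldl
                (fun nick i => PySem.Chars.replace nick (List.replicate i.toNat '.') ['.'])
                (PySem.Chars.replace
                      ((PySem.List.pyRange 0 (L.length : Int) 1).foldl
                        (fun nick i =>
                          let nickT := PySem.List.slice nick (some i) (some (i+1))
                          if nickT ∈ spList then nick else PySem.Chars.replace nick nickT [' ']) L)
                      [' '] [])) = [] then ['a'] else solutionStrip ((PySem.List.pyRange
                  (((PySem.Chars.replace
                      ((PySem.List.pyRange 0 (L.length : Int) 1).foldl
                        (fun nick i =>
                          let nickT := PySem.List.slice nick (some i) (some (i+1))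
                          if nickT ∈ spList then nick else PySem.Chars.replace nick nickT [' ']) L)
                      [' '] []).length : Int)) 1 (-1)).foldl
                (fun nick i => PySem.Chars.replace nick (List.replicate i.toNat '.') ['.'])
                (PySem.Chars.replace
                      ((PySem.List.pyRange 0 (L.length : Int) 1).foldl
                        (fun nick i =>
                          let nickT := PySem.List.slice nick (some i) (some (i+1))
                          if nickT ∈ spList then nick else PySem.Chars.replace nick nickT [' ']) L)
                      [' '] []))) none (some (-(((if solutionStrip ((PySem.List.pyRange
                  (((PySem.Chars.replace
                      ((PySem.List.pyRange 0 (L.length : Int) 1).foldl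
                        (fun nick i =>
                          let nickT := PySem.List.slice nick (some i) (some (i+1))
                          if nickT ∈ spList then nick else PySem.Chars.replace nick nickT [' ']) L)
                      [' '] []).length : Int)) 1 (-1)).foldl
                (fun nick i => PySem.Chars.replace nick (List.replicate i.toNat '.') ['.'])
                (PySem.Chars.replace
                      ((PySem.List.pyRange 0 (L.length : Int) 1).foldl
                        (fun nick i =>
                          let nickT := PySem.List.slice nick (some i) (some (i+1))
                          if nickT ∈ spList then nick else PySem.Chars.replace nick nickT [' ']) L)
                      [' '] [])) = [] then ['a'] else solutionStrip ((PySem.List.pyRange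
                  (((PySem.Chars.replace
                      ((PySem.List.pyRange 0 (L.length : Int) 1).foldl
                        (fun nick i =>
                          let nickT := PySem.List.slice nick (some i) (some (i+1))
                          if nickT ∈ spList then nick else PySem.Chars.replace nick nickT [' ']) L)
                      [' '] []).length : Int)) 1 (-1)).foldl
                (fun nick i => PySem.Chars.replace nick (List.replicate i.toNat '.') ['.'])
                (PySem.Chars.replace
                      ((PySem.List.pyRange 0 (L.length : Int) 1).foldl
                        (fun nick i =>
                          let nickT := PySem.List.slice nick (some i) (some (i+1))
                          if nickT ∈ spList then nick else PySem.Chars.replace nick nickT [' ']) L)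
                      [' '] []))).length : Int) - 15))))
              none (some (-1))
          else PySem.List.slice (if solutionStrip ((PySem.List.pyRange
                  (((PySem.Chars.replace
                      ((PySem.List.pyRange 0 (L.length : Int) 1).foldl
                        (fun nick i =>
                          let nickT := PySem.List.slice nick (some i) (some (i+1))
                          if nickT ∈ spList then nick else PySem.Chars.replace nick nickT [' ']) L)
                      [' '] []).length : Int)) 1 (-1)).foldl
                (fun nick i => PySem.Chars.replace nick (List.replicate i.toNat '.') ['.'])
                (PySem.Chars.replace
                      ((PySem.List.pyRange 0 (L.length : Int) 1).foldl
                        (fun nick i =>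
                          let nickT := PySem.List.slice nick (some i) (some (i+1))
                          if nickT ∈ spList then nick else PySem.Chars.replace nick nickT [' ']) L)
                      [' '] [])) = [] then ['a'] else solutionStrip ((PySem.List.pyRange
                  (((PySem.Chars.replace
                      ((PySem.List.pyRange 0 (L.length : Int) 1).foldl
                        (fun nick i =>
                          let nickT := PySem.List.slice nick (some i) (some (i+1))
                          if nickT ∈ spList then nick else PySem.Chars.replace nick nickT [' ']) L)
                      [' '] []).length : Int)) 1 (-1)).foldl
                (fun nick i => PySem.Chars.replace nick (List.replicate i.toNat '.') ['.'])
                (PySem.Chars.replace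
                      ((PySem.List.pyRange 0 (L.length : Int) 1).foldl
                        (fun nick i =>
                          let nickT := PySem.List.slice nick (some i) (some (i+1))
                          if nickT ∈ spList then nick else PySem.Chars.replace nick nickT [' ']) L)
                      [' '] []))) none (some (-(((if solutionStrip ((PySem.List.pyRange
                  (((PySem.Chars.replace
                      ((PySem.List.pyRange 0 (L.length : Int) 1).foldl
                        (fun nick i =>
                          let nickT := PySem.List.slice nick (some i) (some (i+1))
                          if nickT ∈ spList then nick else PySem.Chars.replace nick nickT [' ']) L)
                      [' '] []).length : Int)) 1 (-1)).foldl
                (fun nick i => PySem.Chars.replace nick (List.replicate i.toNat '.') ['.'])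
                (PySem.Chars.replace
                      ((PySem.List.pyRange 0 (L.length : Int) 1).foldl
                        (fun nick i =>
                          let nickT := PySem.List.slice nick (some i) (some (i+1))
                          if nickT ∈ spList then nick else PySem.Chars.replace nick nickT [' ']) L)
                      [' '] [])) = [] then ['a'] else solutionStrip ((PySem.List.pyRange
                  (((PySem.Chars.replace
                      ((PySem.List.pyRange 0 (L.length : Int) 1).foldl
                        (fun nick i =>
                          let nickT := PySem.List.slice nick (some i) (some (i+1))
                          if nickT ∈ spList then nick else PySem.Chars.replace nick nickT [' ']) L)
                      [' '] []).length : Int)) 1 (-1)).foldl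
                (fun nick i => PySem.Chars.replace nick (List.replicate i.toNat '.') ['.'])
                (PySem.Chars.replace
                      ((PySem.List.pyRange 0 (L.length : Int) 1).foldl
                        (fun nick i =>
                          let nickT := PySem.List.slice nick (some i) (some (i+1))
                          if nickT ∈ spList then nick else PySem.Chars.replace nick nickT [' ']) L)
                      [' '] []))).length : Int) - 15))))
       else (if solutionStrip ((PySem.List.pyRange
                  (((PySem.Chars.replace
                      ((PySem.List.pyRange 0 (L.length : Int) 1).foldl
                        (fun nick i =>
                          let nickT := PySem.List.slice nick (some i) (some (i+1))
                          if nickT ∈ spList then nick else PySem.Chars.replace nick nickT [' ']) L)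
                      [' '] []).length : Int)) 1 (-1)).foldl
                (fun nick i => PySem.Chars.replace nick (List.replicate i.toNat '.') ['.'])
                (PySem.Chars.replace
                      ((PySem.List.pyRange 0 (L.length : Int) 1).foldl
                        (fun nick i =>
                          let nickT := PySem.List.slice nick (some i) (some (i+1))
                          if nickT ∈ spList then nick else PySem.Chars.replace nick nickT [' ']) L)
                      [' '] [])) = [] then ['a'] else solutionStrip ((PySem.List.pyRange
                  (((PySem.Chars.replace
                      ((PySem.List.pyRange 0 (L.length : Int) 1).foldl
                        (fun nick i =>
                          let nickT := PySem.List.slice nick (some i) (some (i+1))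
                          if nickT ∈ spList then nick else PySem.Chars.replace nick nickT [' ']) L)
                      [' '] []).length : Int)) 1 (-1)).foldl
                (fun nick i => PySem.Chars.replace nick (List.replicate i.toNat '.') ['.'])
                (PySem.Chars.replace
                      ((PySem.List.pyRange 0 (L.length : Int) 1).foldl
                        (fun nick i =>
                          let nickT := PySem.List.slice nick (some i) (some (i+1))
                          if nickT ∈ spList then nick else PySem.Chars.replace nick nickT [' ']) L)
                      [' '] [])))) =
    solutionPad
      (if (midVal L).length > 15 then
         (if PySem.List.slice
              (PySem.List.slice (midVal L) none (some (-(((midVal L).length : Int) - 15))))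
              (some (-1)) none = ['.']
          then PySem.List.slice
              (PySem.List.slice (midVal L) none (some (-(((midVal L).length : Int) - 15))))
              none (some (-1))
          else PySem.List.slice (midVal L) none (some (-(((midVal L).length : Int) - 15))))
       else (midVal L)) := by
  rw [stage1_full L]
  by_cases hm0 : L.filter okc = []
  · rw [hm0]
    rw [show (((([] : List Char)).length : Int)) = 0 from by simp]
    rw [PySem.List.pyRange_neg_one_eq_nil (by norm_num)]
    simp only [List.foldl_nil]
    rw [strip_fix [] (by simp) (by simp)]
    have hmid : midVal L = ['a'] := by
      rw [midVal, hm0]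
      simp [sqz, dropTrail]
    rw [if_pos rfl, hmid]
  · have h1 : 1 ≤ (L.filter okc).length := List.length_pos_iff.mpr hm0
    have hn0 : ¬ (List.replicate ((L.filter okc).length + 1) '.' <:+: L.filter okc) := by
      intro h
      have := h.length_le
      simp at this
    obtain ⟨hA2, hA2b⟩ := loop_dots (L.filter okc).length h1 (L.filter okc) hn0
    have h3 : (PySem.List.pyRange (((L.filter okc).length : Int)) 1 (-1)).foldl
        (fun nick i => PySem.Chars.replace nick (List.replicate i.toNat '.') ['.'])
        (L.filter okc) = sqz false (L.filter okc) :=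
      (sqz_id_of_norun2 _ hA2b).symm.trans (by rw [hA2])
    have hmid : (if dropTrail (sqz true (L.filter okc)) = [] then ['a']
        else dropTrail (sqz true (L.filter okc))) = midVal L := rfl
    rw [h3, strip_main, hmid]

theorem s0_eq (L : List Char) :
    (if (if L.foldl (fun out c =>
            if c ∈ allowedB then c :: out
            else if c = '.' ∧ out ≠ [] ∧ out.head? ≠ some '.' then '.' :: out
            else out) [] ≠ [] ∧
            (L.foldl (fun out c =>
            if c ∈ allowedB then c :: out
            else if c = '.' ∧ out ≠ [] ∧ out.head? ≠ some '.' then '.' :: out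
            else out) []).head? = some '.'
         then (L.foldl (fun out c =>
            if c ∈ allowedB then c :: out
            else if c = '.' ∧ out ≠ [] ∧ out.head? ≠ some '.' then '.' :: out
            else out) []).tail
         else L.foldl (fun out c =>
            if c ∈ allowedB then c :: out
            else if c = '.' ∧ out ≠ [] ∧ out.head? ≠ some '.' then '.' :: out
            else out) []) ≠ []
     then (if L.foldl (fun out c =>
            if c ∈ allowedB then c :: out
            else if c = '.' ∧ out ≠ [] ∧ out.head? ≠ some '.' then '.' :: out
            else out) [] ≠ [] ∧
            (L.foldl (fun out c =>
            if c ∈ allowedB then c :: out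
            else if c = '.' ∧ out ≠ [] ∧ out.head? ≠ some '.' then '.' :: out
            else out) []).head? = some '.'
         then (L.foldl (fun out c =>
            if c ∈ allowedB then c :: out
            else if c = '.' ∧ out ≠ [] ∧ out.head? ≠ some '.' then '.' :: out
            else out) []).tail
         else L.foldl (fun out c =>
            if c ∈ allowedB then c :: out
            else if c = '.' ∧ out ≠ [] ∧ out.head? ≠ some '.' then '.' :: out
            else out) []).reverse
     else ['a']) = midVal L := by
  rw [foldB L []]
  rw [show pdFlag [] = true from rfl, List.append_nil]
  set u := sqz true (L.filter okc) with hu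
  have hmid : midVal L = if dropTrail u = [] then ['a'] else dropTrail u := rfl
  by_cases hd : u.getLast? = some '.'
  · have hune : u ≠ [] := by
      intro h
      rw [h] at hd
      simp at hd
    have hcond : u.reverse ≠ [] ∧ u.reverse.head? = some '.' := by
      constructor
      · simpa using hune
      · rw [List.head?_reverse]
        exact hd
    rw [if_pos hcond, List.tail_reverse]
    have hdt : dropTrail u = u.dropLast := by rw [dropTrail, if_pos hd]
    by_cases hv : u.dropLast = []
    · rw [hv]
      simp only [List.reverse_nil, ne_eq, not_true_eq_false, if_false]
      rw [hmid, hdt, hv, if_pos rfl]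
    · rw [if_pos (by simpa using hv), List.reverse_reverse, hmid, hdt, if_neg hv]
  · have hcond : ¬ (u.reverse ≠ [] ∧ u.reverse.head? = some '.') := by
      rintro ⟨_, h2⟩
      rw [List.head?_reverse] at h2
      exact hd h2
    rw [if_neg hcond]
    have hdt : dropTrail u = u := by rw [dropTrail, if_neg hd]
    by_cases hv : u = []
    · rw [hv]
      simp only [List.reverse_nil, ne_eq, not_true_eq_false, if_false]
      rw [hmid, hdt, hv, if_pos rfl]
    · rw [if_pos (by simpa using hv), List.reverse_reverse, hmid, hdt, if_neg hv]

theorem midVal_ne (L : List Char) : midVal L ≠ [] := by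
  rw [midVal]
  by_cases h : dropTrail (sqz true (L.filter okc)) = []
  · rw [if_pos h]
    simp
  · rw [if_neg h]
    exact h

theorem midVal_last (L : List Char) : (midVal L).getLast? ≠ some '.' := by
  rw [midVal]
  by_cases h : dropTrail (sqz true (L.filter okc)) = []
  · rw [if_pos h]
    simp
  · rw [if_neg h]
    exact dropTrail_last _ (sqz_norun2 _ true)

-- ===== VERDICT (by name: the statement is the Claim_ definition above) =====
set_option maxHeartbeats 2000000 in
theorem solution_spec : Claim_equal_solution := by
  intro s _
  unfold Spec_solution solution solution_alt
  exact congrArg String.ofList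
    ((A_eq ((PySem.Str.lower s).toList)).trans
      ((tail_stage (midVal ((PySem.Str.lower s).toList)) (midVal_ne _) (midVal_last _)).trans
        (congrArg
          (fun w : List Char =>
            (if (if PySem.Chars.endswith (PySem.List.slice w none (some 15)) ['.'] = true
                 then PySem.List.slice (PySem.List.slice w none (some 15)) none (some (-1))
                 else PySem.List.slice w none (some 15)).length < 3
             then (if PySem.Chars.endswith (PySem.List.slice w none (some 15)) ['.'] = true
                   then PySem.List.slice (PySem.List.slice w none (some 15)) none (some (-1))
                   else PySem.List.slice w none (some 15)) ++
                  List.replicate (3 - (if PySem.Chars.endswith (PySem.List.slice w none (some 15)) ['.'] = true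
                   then PySem.List.slice (PySem.List.slice w none (some 15)) none (some (-1))
                   else PySem.List.slice w none (some 15)).length)
                    ((PySem.List.pyGet? (if PySem.Chars.endswith (PySem.List.slice w none (some 15)) ['.'] = true
                   then PySem.List.slice (PySem.List.slice w none (some 15)) none (some (-1))
                   else PySem.List.slice w none (some 15)) (-1)).getD 'a')
             else (if PySem.Chars.endswith (PySem.List.slice w none (some 15)) ['.'] = true
                   then PySem.List.slice (PySem.List.slice w none (some 15)) none (some (-1))
                   else PySem.List.slice w none (some 15))))
          (s0_eq ((PySem.Str.lower s).toList)).symm)))
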